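-- pv_equiv track=rewrite | github.com/298AusCycling/CoachGUI | iteration.py | get_chunks_from_schedule
-- ===== SOURCE A (Python) =====
-- def get_chunks_from_schedule(switch_schedule, half_lap_completed, peel_location=None, half_lap_dist=125):
--     chunks = []
--     current_chunk = []
--     chunk_start_idx = half_lap_completed - 1  # where we start processing
--
--     rest_schedule = switch_schedule[chunk_start_idx:]
--     total_half_laps = len(rest_schedule)
--
--     for i, val in enumerate(rest_schedule):
--         current_chunk.append(val)
--
--         # Check if it's a switch
--         if val == 1:
--             chunk_half_laps = len(current_chunk)
--             switch_idx = chunk_start_idx + chunk_half_laps  # 1-based index (half-lap after this one)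
--
--             # Break early if peel_location exceeded
--             if peel_location is not None and switch_idx > peel_location:
--                 break
--
--             chunk_half_lap_indices = list(range(chunk_start_idx, chunk_start_idx + chunk_half_laps))
--             distance = sum(127 if switch_schedule[i] == 1 else 125 for i in chunk_half_lap_indices)
--
--             chunks.append({
--                 'start_idx': chunk_start_idx,
--                 'num_half_laps': chunk_half_laps,
--                 'distance': distance,
--                 'switch_idx': switch_idx
--             })
--
--             current_chunk = []
--             chunk_start_idx += chunk_half_laps
--
--     # Handle trailing chunk (if it doesn’t end in a 1)
--     if current_chunk:
--         chunk_half_laps = len(current_chunk)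
--         chunk_half_lap_indices = list(range(chunk_start_idx, chunk_start_idx + chunk_half_laps))
--         distance = sum(127 if switch_schedule[i] == 1 else 125 for i in chunk_half_lap_indices)
--
--         chunks.append({
--             'start_idx': chunk_start_idx,
--             'num_half_laps': chunk_half_laps,
--             'distance': distance,
--             'switch_idx': None  # no switch at the end
--         })
--
--     return chunks
-- ===== SOURCE B (Python) =====
-- def get_chunks_from_schedule(switch_schedule, half_lap_completed, peel_location=None, half_lap_dist=125):
--     start0 = half_lap_completed - 1
--     rest = switch_schedule[start0:]
--     n = len(rest)
--
--     def dist(s, m):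
--         return sum(127 if switch_schedule[i] == 1 else 125 for i in range(s, s + m))
--
--     def chunk(s, m, sw):
--         return {'start_idx': s, 'num_half_laps': m, 'distance': dist(s, m), 'switch_idx': sw}
--
--     # phase 1: absolute (relative-to-rest, 1-based) boundary after each switch
--     boundaries = [j + 1 for j, v in enumerate(rest) if v == 1]
--
--     # phase 2: emit one chunk per consecutive pair of boundaries
--     chunks = []
--     prev = 0
--     for b in boundaries:
--         s = start0 + prev
--         m = b - prev
--         sw = s + m
--         if peel_location is not None and sw > peel_location:
--             chunks.append(chunk(s, m, None))
--             return chunks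
--         chunks.append(chunk(s, m, sw))
--         prev = b
--     if prev < n:
--         chunks.append(chunk(start0 + prev, n - prev, None))
--     return chunks
-- ===== Notes on version B (the rewrite author's own statement) =====
-- stated objective: alternative
-- what changed: B replaces A's single element-by-element loop with a growing current_chunk list by two passes: one scan collecting the 1-based boundary after each switch, then a loop over consecutive boundary pairs emitting each chunk directly.
import Mathlib
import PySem

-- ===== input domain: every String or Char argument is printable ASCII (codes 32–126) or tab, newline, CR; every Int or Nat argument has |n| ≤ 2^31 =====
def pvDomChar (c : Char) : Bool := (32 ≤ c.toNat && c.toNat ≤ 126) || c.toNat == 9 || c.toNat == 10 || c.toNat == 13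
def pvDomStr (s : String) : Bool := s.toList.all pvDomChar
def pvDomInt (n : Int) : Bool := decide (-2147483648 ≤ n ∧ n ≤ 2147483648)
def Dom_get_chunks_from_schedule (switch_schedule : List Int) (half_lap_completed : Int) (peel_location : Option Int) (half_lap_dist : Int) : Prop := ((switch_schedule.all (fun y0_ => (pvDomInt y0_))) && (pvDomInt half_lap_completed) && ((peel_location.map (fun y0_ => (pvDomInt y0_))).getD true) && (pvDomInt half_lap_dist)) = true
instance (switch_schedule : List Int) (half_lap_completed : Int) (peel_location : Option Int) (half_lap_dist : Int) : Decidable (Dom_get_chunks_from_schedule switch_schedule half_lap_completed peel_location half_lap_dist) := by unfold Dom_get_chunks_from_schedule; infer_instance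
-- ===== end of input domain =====

-- B splits the work into two passes (collect switch boundaries, then emit chunks) instead of
-- A's single element-by-element loop with a growing current_chunk; objective: alternative decomposition.

-- shared literal pieces of both Pythons (identical dict literal / sum expression / break test in Source A and Source B)
def pvChunk (s m d : Int) (sw : Option Int) : List (String × Option Int) :=
  [("start_idx", some s), ("num_half_laps", some m), ("distance", some d), ("switch_idx", sw)]

-- sum(127 if switch_schedule[i] == 1 else 125 for i in range(a, b)); pyGetD 0 is exact under
-- Pre_ (every index in range there; Python raises IndexError exactly on the inputs Pre_ excludes)
def pvDist (sched : List Int) (a b : Int) : Int :=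
  ((PySem.List.pyRange a b 1).map (fun i => if PySem.List.pyGetD sched i 0 = 1 then (127:Int) else 125)).sum

-- 'peel_location is not None and switch_idx > peel_location'
def pvPeelExceeded (peel : Option Int) (sw : Int) : Bool :=
  match peel with | some p => decide (sw > p) | none => false

-- ===== PORT A =====
def pvALoop (sched : List Int) (peel : Option Int) :
    List Int → List (List (String × Option Int)) → List Int → Int → List (List (String × Option Int))
  | [], chunks, cur, csi =>
      if cur = [] then chunks
      else chunks ++ [pvChunk csi cur.length (pvDist sched csi (csi + cur.length)) none]
  | v :: rest, chunks, cur, csi =>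
      let cur' := cur ++ [v]
      if v = 1 then
        let m : Int := cur'.length
        let sw := csi + m
        if pvPeelExceeded peel sw then
          -- break: the loop stops; cur' is non-empty, so the trailing chunk is emitted
          chunks ++ [pvChunk csi m (pvDist sched csi (csi + m)) none]
        else
          pvALoop sched peel rest (chunks ++ [pvChunk csi m (pvDist sched csi (csi + m)) (some sw)]) [] (csi + m)
      else
        pvALoop sched peel rest chunks cur' csi

def get_chunks_from_schedule (switch_schedule : List Int) (half_lap_completed : Int) (peel_location : Option Int) (half_lap_dist : Int) : List (List (String × Option Int)) :=
  let chunk_start_idx := half_lap_completed - 1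
  let rest_schedule := PySem.List.slice switch_schedule (some chunk_start_idx) none
  pvALoop switch_schedule peel_location rest_schedule [] [] chunk_start_idx

-- ===== PORT B =====
def pvBLoop (sched : List Int) (peel : Option Int) (start0 n : Int) :
    List Int → Int → List (List (String × Option Int)) → List (List (String × Option Int))
  | [], prev, chunks =>
      if prev < n then
        chunks ++ [pvChunk (start0 + prev) (n - prev) (pvDist sched (start0 + prev) (start0 + prev + (n - prev))) none]
      else chunks
  | b :: bs, prev, chunks =>
      let s := start0 + prev
      let m := b - prev
      let sw := s + m
      if pvPeelExceeded peel sw then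
        chunks ++ [pvChunk s m (pvDist sched s (s + m)) none]
      else
        pvBLoop sched peel start0 n bs b (chunks ++ [pvChunk s m (pvDist sched s (s + m)) (some sw)])

def get_chunks_from_schedule_alt (switch_schedule : List Int) (half_lap_completed : Int) (peel_location : Option Int) (half_lap_dist : Int) : List (List (String × Option Int)) :=
  let start0 := half_lap_completed - 1
  let rest := PySem.List.slice switch_schedule (some start0) none
  let n : Int := rest.length
  let boundaries := (PySem.List.enumerate rest 0).filterMap
    (fun jv => if jv.2 = 1 then some (jv.1 + 1) else none)
  pvBLoop switch_schedule peel_location start0 n boundaries 0 []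

-- ===== PRECONDITION & SPEC =====
-- Pre_ excludes exactly the inputs on which the Python A raises IndexError: a non-empty schedule
-- with half_lap_completed - 1 below -len(switch_schedule) (the distance sum then indexes past the front).
def Pre_get_chunks_from_schedule (switch_schedule : List Int) (half_lap_completed : Int) (peel_location : Option Int) (half_lap_dist : Int) : Prop :=
  switch_schedule = [] ∨ -(switch_schedule.length : Int) ≤ half_lap_completed - 1
instance (switch_schedule : List Int) (half_lap_completed : Int) (peel_location : Option Int) (half_lap_dist : Int) : Decidable (Pre_get_chunks_from_schedule switch_schedule half_lap_completed peel_location half_lap_dist) := by unfold Pre_get_chunks_from_schedule; infer_instance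

def pvWitness_get_chunks_from_schedule : List Int × Int × Option Int × Int := ([1, 0, 1], 1, none, 125)

def Spec_get_chunks_from_schedule (switch_schedule : List Int) (half_lap_completed : Int) (peel_location : Option Int) (half_lap_dist : Int) (out : List (List (String × Option Int))) : Prop := out = get_chunks_from_schedule_alt switch_schedule half_lap_completed peel_location half_lap_dist
instance (switch_schedule : List Int) (half_lap_completed : Int) (peel_location : Option Int) (half_lap_dist : Int) (out : List (List (String × Option Int))) : Decidable (Spec_get_chunks_from_schedule switch_schedule half_lap_completed peel_location half_lap_dist out) := by unfold Spec_get_chunks_from_schedule; infer_instance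

-- ===== CLAIM (what is proved, stated in full; the proofs are below) =====
def Claim_equal_get_chunks_from_schedule : Prop := ∀ (switch_schedule : List Int) (half_lap_completed : Int) (peel_location : Option Int) (half_lap_dist : Int), Dom_get_chunks_from_schedule switch_schedule half_lap_completed peel_location half_lap_dist → Pre_get_chunks_from_schedule switch_schedule half_lap_completed peel_location half_lap_dist → Spec_get_chunks_from_schedule switch_schedule half_lap_completed peel_location half_lap_dist (get_chunks_from_schedule switch_schedule half_lap_completed peel_location half_lap_dist)

-- ===== LEMMAS AND PROOFS =====

-- relative 1-based boundary after each switch of a list (proof-side view of B's first pass)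
def pvBounds : List Int → List Int
  | [] => []
  | v :: t => (if v = 1 then [(1:Int)] else []) ++ (pvBounds t).map (· + 1)

lemma pv_map_shift (l : List Int) (c : Int) :
    (l.map (· + 1)).map (· + c) = l.map (· + (c + 1)):= by
  rw [List.map_map]
  exact List.map_congr_left (fun x _ => by simp [Function.comp]; ring)

lemma pv_bounds_enum (xs : List Int) : ∀ (s : Int),
    (PySem.List.enumerate xs s).filterMap (fun jv => if jv.2 = 1 then some (jv.1 + 1) else none)
      = (pvBounds xs).map (· + s) := by
  induction xs with
  | nil => intro s; simp [pvBounds, PySem.List.enumerate_nil]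
  | cons v t ih =>
      intro s
      rw [PySem.List.enumerate_cons, List.filterMap_cons, pvBounds]
      by_cases hv : v = 1
      · simp only [hv, ih (s + 1), List.map_append, pv_map_shift]
        simp [add_comm]
      · simp only [ih (s + 1), hv, List.map_append, pv_map_shift]
        simp [add_comm]

lemma pv_loops_eq (sched : List Int) (peel : Option Int) (start0 : Int) :
    ∀ (rest cur : List Int) (prev : Int) (chunks : List (List (String × Option Int))),
    pvALoop sched peel rest chunks cur (start0 + prev)
      = pvBLoop sched peel start0 (prev + cur.length + rest.length)
          ((pvBounds rest).map (· + (prev + (cur.length : Int)))) prev chunks := by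
  intro rest
  induction rest with
  | nil =>
      intro cur prev chunks
      simp only [pvALoop, pvBounds, List.map_nil, pvBLoop, List.length_nil, Nat.cast_zero,
        add_zero]
      by_cases hc : cur = []
      · simp [hc]
      · have hlen : 0 < cur.length := List.length_pos_iff.mpr hc
        rw [if_neg hc, if_pos (by omega)]
        have h1 : prev + (cur.length : Int) - prev = (cur.length : Int) := by ring
        rw [h1]
  | cons v t ih =>
      intro cur prev chunks
      by_cases hv : v = 1
      · subst hv
        simp only [pvALoop, pvBounds, reduceIte, List.map_append, List.map_cons,
          List.map_nil, pv_map_shift, List.length_cons, List.length_append, List.length_nil,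
          Nat.cast_add, Nat.cast_one, Nat.cast_zero, zero_add, List.singleton_append]
        have e1 : (1:Int) + (prev + (cur.length : Int)) = prev + ((cur.length : Int) + 1) := by
          ring
        rw [e1]
        simp only [pvBLoop]
        have e2 : prev + ((cur.length : Int) + 1) - prev = (cur.length : Int) + 1 := by ring
        rw [e2]
        by_cases hp : pvPeelExceeded peel (start0 + prev + ((cur.length : Int) + 1)) = true
        · rw [if_pos hp, if_pos hp]
        · rw [if_neg hp, if_neg hp]
          have harg : start0 + prev + ((cur.length : Int) + 1)
              = start0 + (prev + ((cur.length : Int) + 1)) := by ring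
          rw [harg, ih [] (prev + ((cur.length : Int) + 1))]
          simp only [List.length_nil, Nat.cast_zero, add_zero]
          ring_nf
      · simp only [pvALoop, pvBounds, if_neg hv, pv_map_shift,
          List.nil_append]
        rw [ih (cur ++ [v]) prev]
        simp only [List.length_append, List.length_cons, List.length_nil, Nat.cast_add,
          Nat.cast_one, Nat.cast_zero]
        ring_nf

-- ===== VERDICT (by name: the statement is the Claim_ definition above) =====
theorem get_chunks_from_schedule_spec : Claim_equal_get_chunks_from_schedule := by
  intro ss hlc peel hld _ _
  unfold Spec_get_chunks_from_schedule get_chunks_from_schedule get_chunks_from_schedule_alt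
  simp only
  rw [pv_bounds_enum]
  have h0 : hlc - 1 = (hlc - 1) + 0 := by ring
  rw [h0, pv_loops_eq ss peel (hlc - 1)
    (PySem.List.slice ss (some (hlc - 1 + 0)) none) [] 0 []]
  simp
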